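-- pv_equiv track=rewrite | github.com/bizzlechizzle/nightfoxfilms | camera-signatures/scripts/merge_sources.py | build_matching_rules
-- ===== SOURCE A (Python) =====
-- def build_matching_rules(make: str, model: str) -> dict:
--     """Build matching rules for a camera."""
--     rules = {
--         "exif_make": [make],
--         "exif_model": [model],
--         "filename_patterns": [],
--         "folder_patterns": []
--     }
--
--     # Add common filename patterns based on make
--     make_lower = make.lower()
--     model_lower = model.lower()
--
--     if make_lower == "sony":
--         if any(x in model_lower for x in ['fx3', 'fx6', 'fx9', 'a7', 'a9', 'a1']):
--             rules['filename_patterns'] = ["C*.MP4", "C*.MXF"]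
--             rules['folder_patterns'] = ["PRIVATE/M4ROOT/*"]
--         elif 'handycam' in model_lower or model_lower.startswith('hdr-'):
--             rules['filename_patterns'] = ["M2U*.MPG", "*.MTS"]
--
--     elif make_lower == "canon":
--         if any(x in model_lower for x in ['c70', 'c300', 'c500', 'c200']):
--             rules['filename_patterns'] = ["*.MXF", "*.MP4"]
--             rules['folder_patterns'] = ["CONTENTS/CLIPS/*"]
--         elif any(x in model_lower for x in ['5d', '6d', '7d', 'r5', 'r6', 'r3']):
--             rules['filename_patterns'] = ["MVI_*.MOV", "MVI_*.MP4"]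
--         else:
--             rules['filename_patterns'] = ["MVI_*.MOV", "MVI_*.AVI"]
--
--     elif make_lower == "panasonic":
--         if any(x in model_lower for x in ['gh5', 'gh6', 's1', 's5', 'bgh1']):
--             rules['filename_patterns'] = ["P*.MOV", "P*.MP4"]
--         else:
--             rules['filename_patterns'] = ["*.MTS", "*.M2TS"]
--
--     elif make_lower == "gopro":
--         rules['filename_patterns'] = ["GH*.MP4", "GP*.MP4", "GOPR*.MP4", "GX*.MP4"]
--
--     elif make_lower == "dji":
--         rules['filename_patterns'] = ["DJI_*.MP4", "DJI_*.MOV"]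
--
--     elif make_lower == "apple":
--         rules['filename_patterns'] = ["IMG_*.MOV", "IMG_*.MP4"]
--
--     elif make_lower == "blackmagic":
--         rules['filename_patterns'] = ["*.BRAW", "*.DNG"]
--
--     return rules
-- ===== SOURCE B (Python) =====
-- # Table-driven rewrite: each make maps to an ordered list of
-- # (substrings, prefixes, filename_patterns, folder_patterns) rules;
-- # a rule with no substrings and no prefixes is a catch-all default.
-- _RULES = {
--     "sony": [
--         (['fx3', 'fx6', 'fx9', 'a7', 'a9', 'a1'], [],
--          ["C*.MP4", "C*.MXF"], ["PRIVATE/M4ROOT/*"]),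
--         (['handycam'], ['hdr-'], ["M2U*.MPG", "*.MTS"], []),
--     ],
--     "canon": [
--         (['c70', 'c300', 'c500', 'c200'], [],
--          ["*.MXF", "*.MP4"], ["CONTENTS/CLIPS/*"]),
--         (['5d', '6d', '7d', 'r5', 'r6', 'r3'], [],
--          ["MVI_*.MOV", "MVI_*.MP4"], []),
--         ([], [], ["MVI_*.MOV", "MVI_*.AVI"], []),
--     ],
--     "panasonic": [
--         (['gh5', 'gh6', 's1', 's5', 'bgh1'], [], ["P*.MOV", "P*.MP4"], []),
--         ([], [], ["*.MTS", "*.M2TS"], []),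
--     ],
--     "gopro": [([], [], ["GH*.MP4", "GP*.MP4", "GOPR*.MP4", "GX*.MP4"], [])],
--     "dji": [([], [], ["DJI_*.MP4", "DJI_*.MOV"], [])],
--     "apple": [([], [], ["IMG_*.MOV", "IMG_*.MP4"], [])],
--     "blackmagic": [([], [], ["*.BRAW", "*.DNG"], [])],
-- }
--
--
-- def build_matching_rules(make: str, model: str) -> dict:
--     """Build matching rules for a camera."""
--     model_lower = model.lower()
--     filename_patterns, folder_patterns = [], []
--     for subs, prefixes, files, folders in _RULES.get(make.lower(), []):
--         if ((not subs and not prefixes)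
--                 or any(s in model_lower for s in subs)
--                 or any(model_lower.startswith(p) for p in prefixes)):
--             filename_patterns, folder_patterns = files, folders
--             break
--     return {
--         "exif_make": [make],
--         "exif_model": [model],
--         "filename_patterns": filename_patterns,
--         "folder_patterns": folder_patterns,
--     }
-- ===== Notes on version B (the rewrite author's own statement) =====
-- stated objective: simpler
-- what changed: Replaces the nested if/elif branch cascade with a declarative table mapping each make to an ordered list of (substrings, prefixes, patterns) rules scanned for the first match, with an empty rule as the catch-all default.
import Mathlib
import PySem

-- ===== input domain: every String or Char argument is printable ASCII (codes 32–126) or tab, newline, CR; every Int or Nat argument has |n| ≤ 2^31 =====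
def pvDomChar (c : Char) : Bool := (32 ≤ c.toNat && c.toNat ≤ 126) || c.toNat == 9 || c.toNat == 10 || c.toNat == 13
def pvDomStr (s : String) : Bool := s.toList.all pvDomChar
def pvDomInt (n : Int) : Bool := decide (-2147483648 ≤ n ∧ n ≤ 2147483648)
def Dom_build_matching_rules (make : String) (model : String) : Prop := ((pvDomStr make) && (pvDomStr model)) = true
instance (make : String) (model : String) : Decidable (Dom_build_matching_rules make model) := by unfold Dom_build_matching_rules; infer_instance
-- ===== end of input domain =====

-- B replaces A's if/elif cascade by a declarative rule table scanned for the first match (objective: simpler).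

-- ===== PORT A =====
def build_matching_rules (make : String) (model : String) : List (String × List String) :=
  let rules : PySem.Dict String (List String) :=
    PySem.Dict.ofList [("exif_make", [make]), ("exif_model", [model]),
                       ("filename_patterns", []), ("folder_patterns", [])]
  let make_lower := PySem.Str.lower make
  let model_lower := PySem.Str.lower model
  let rules :=
    if make_lower = "sony" then
      if (["fx3", "fx6", "fx9", "a7", "a9", "a1"]).any (fun x => PySem.Str.isIn x model_lower) then
        (rules.insert "filename_patterns" ["C*.MP4", "C*.MXF"]).insert "folder_patterns" ["PRIVATE/M4ROOT/*"]
      else if PySem.Str.isIn "handycam" model_lower || PySem.Str.startswith model_lower "hdr-" then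
        rules.insert "filename_patterns" ["M2U*.MPG", "*.MTS"]
      else rules
    else if make_lower = "canon" then
      if (["c70", "c300", "c500", "c200"]).any (fun x => PySem.Str.isIn x model_lower) then
        (rules.insert "filename_patterns" ["*.MXF", "*.MP4"]).insert "folder_patterns" ["CONTENTS/CLIPS/*"]
      else if (["5d", "6d", "7d", "r5", "r6", "r3"]).any (fun x => PySem.Str.isIn x model_lower) then
        rules.insert "filename_patterns" ["MVI_*.MOV", "MVI_*.MP4"]
      else
        rules.insert "filename_patterns" ["MVI_*.MOV", "MVI_*.AVI"]
    else if make_lower = "panasonic" then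
      if (["gh5", "gh6", "s1", "s5", "bgh1"]).any (fun x => PySem.Str.isIn x model_lower) then
        rules.insert "filename_patterns" ["P*.MOV", "P*.MP4"]
      else
        rules.insert "filename_patterns" ["*.MTS", "*.M2TS"]
    else if make_lower = "gopro" then
      rules.insert "filename_patterns" ["GH*.MP4", "GP*.MP4", "GOPR*.MP4", "GX*.MP4"]
    else if make_lower = "dji" then
      rules.insert "filename_patterns" ["DJI_*.MP4", "DJI_*.MOV"]
    else if make_lower = "apple" then
      rules.insert "filename_patterns" ["IMG_*.MOV", "IMG_*.MP4"]
    else if make_lower = "blackmagic" then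
      rules.insert "filename_patterns" ["*.BRAW", "*.DNG"]
    else rules
  rules.items

-- ===== PORT B =====
-- one rule: (substrings, prefixes, filename_patterns, folder_patterns)
def pvRuleTable : PySem.Dict String (List (List String × List String × List String × List String)) :=
  PySem.Dict.ofList
    [ ("sony", [(["fx3", "fx6", "fx9", "a7", "a9", "a1"], [], ["C*.MP4", "C*.MXF"], ["PRIVATE/M4ROOT/*"]),
                (["handycam"], ["hdr-"], ["M2U*.MPG", "*.MTS"], [])]),
      ("canon", [(["c70", "c300", "c500", "c200"], [], ["*.MXF", "*.MP4"], ["CONTENTS/CLIPS/*"]),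
                 (["5d", "6d", "7d", "r5", "r6", "r3"], [], ["MVI_*.MOV", "MVI_*.MP4"], []),
                 ([], [], ["MVI_*.MOV", "MVI_*.AVI"], [])]),
      ("panasonic", [(["gh5", "gh6", "s1", "s5", "bgh1"], [], ["P*.MOV", "P*.MP4"], []),
                     ([], [], ["*.MTS", "*.M2TS"], [])]),
      ("gopro", [([], [], ["GH*.MP4", "GP*.MP4", "GOPR*.MP4", "GX*.MP4"], [])]),
      ("dji", [([], [], ["DJI_*.MP4", "DJI_*.MOV"], [])]),
      ("apple", [([], [], ["IMG_*.MOV", "IMG_*.MP4"], [])]),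
      ("blackmagic", [([], [], ["*.BRAW", "*.DNG"], [])]) ]

-- the for-loop with break: first rule whose predicate matches, else ([], [])
def pvFirstMatch (model_lower : String) :
    List (List String × List String × List String × List String) → List String × List String
  | [] => ([], [])
  | (subs, prefixes, files, folders) :: rest =>
    if (subs.isEmpty && prefixes.isEmpty)
        || subs.any (fun s => PySem.Str.isIn s model_lower)
        || prefixes.any (fun p => PySem.Str.startswith model_lower p) then
      (files, folders)
    else pvFirstMatch model_lower rest

def build_matching_rules_alt (make : String) (model : String) : List (String × List String) :=
  let model_lower := PySem.Str.lower model
  let pats := pvFirstMatch model_lower (pvRuleTable.getD (PySem.Str.lower make) [])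
  [("exif_make", [make]), ("exif_model", [model]),
   ("filename_patterns", pats.1), ("folder_patterns", pats.2)]

-- ===== PRECONDITION & SPEC =====
def Spec_build_matching_rules (make : String) (model : String) (out : List (String × List String)) : Prop := out = build_matching_rules_alt make model
instance (make : String) (model : String) (out : List (String × List String)) : Decidable (Spec_build_matching_rules make model out) := by unfold Spec_build_matching_rules; infer_instance

-- ===== CLAIM (what is proved, stated in full; the proofs are below) =====
def Claim_equal_build_matching_rules : Prop := ∀ (make : String) (model : String), Dom_build_matching_rules make model → Spec_build_matching_rules make model (build_matching_rules make model)

-- ===== LEMMAS AND PROOFS =====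

-- ===== VERDICT (by name: the statement is the Claim_ definition above) =====


theorem build_matching_rules_spec : Claim_equal_build_matching_rules := by
  intro make model _
  unfold Spec_build_matching_rules build_matching_rules build_matching_rules_alt pvRuleTable
  by_cases h1 : PySem.Str.lower make = "sony"
  · simp [h1, PySem.Dict.ofList, PySem.Dict.insert, PySem.Dict.update, PySem.Dict.empty,
          PySem.Dict.contains, PySem.Dict.getD, PySem.Dict.get?, pvFirstMatch]
    split_ifs <;> simp
  by_cases h2 : PySem.Str.lower make = "canon"
  · simp [h2, PySem.Dict.ofList, PySem.Dict.insert, PySem.Dict.update, PySem.Dict.empty,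
          PySem.Dict.contains, PySem.Dict.getD, PySem.Dict.get?, pvFirstMatch]
    split_ifs <;> simp
  by_cases h3 : PySem.Str.lower make = "panasonic"
  · simp [h3, PySem.Dict.ofList, PySem.Dict.insert, PySem.Dict.update, PySem.Dict.empty,
          PySem.Dict.contains, PySem.Dict.getD, PySem.Dict.get?, pvFirstMatch]
    split_ifs <;> simp
  by_cases h4 : PySem.Str.lower make = "gopro"
  · simp [h4, PySem.Dict.ofList, PySem.Dict.insert, PySem.Dict.update, PySem.Dict.empty,
          PySem.Dict.contains, PySem.Dict.getD, PySem.Dict.get?, pvFirstMatch]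
  by_cases h5 : PySem.Str.lower make = "dji"
  · simp [h5, PySem.Dict.ofList, PySem.Dict.insert, PySem.Dict.update, PySem.Dict.empty,
          PySem.Dict.contains, PySem.Dict.getD, PySem.Dict.get?, pvFirstMatch]
  by_cases h6 : PySem.Str.lower make = "apple"
  · simp [h6, PySem.Dict.ofList, PySem.Dict.insert, PySem.Dict.update, PySem.Dict.empty,
          PySem.Dict.contains, PySem.Dict.getD, PySem.Dict.get?, pvFirstMatch]
  by_cases h7 : PySem.Str.lower make = "blackmagic"
  · simp [h7, PySem.Dict.ofList, PySem.Dict.insert, PySem.Dict.update, PySem.Dict.empty,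
          PySem.Dict.contains, PySem.Dict.getD, PySem.Dict.get?, pvFirstMatch]
  · have e1 : ("sony" == PySem.Str.lower make) = false := beq_eq_false_iff_ne.mpr (fun h => h1 h.symm)
    have e2 : ("canon" == PySem.Str.lower make) = false := beq_eq_false_iff_ne.mpr (fun h => h2 h.symm)
    have e3 : ("panasonic" == PySem.Str.lower make) = false := beq_eq_false_iff_ne.mpr (fun h => h3 h.symm)
    have e4 : ("gopro" == PySem.Str.lower make) = false := beq_eq_false_iff_ne.mpr (fun h => h4 h.symm)
    have e5 : ("dji" == PySem.Str.lower make) = false := beq_eq_false_iff_ne.mpr (fun h => h5 h.symm)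
    have e6 : ("apple" == PySem.Str.lower make) = false := beq_eq_false_iff_ne.mpr (fun h => h6 h.symm)
    have e7 : ("blackmagic" == PySem.Str.lower make) = false := beq_eq_false_iff_ne.mpr (fun h => h7 h.symm)
    simp [h1, h2, h3, h4, h5, h6, h7, e1, e2, e3, e4, e5, e6, e7, PySem.Dict.ofList,
          PySem.Dict.insert, PySem.Dict.update, PySem.Dict.empty, PySem.Dict.contains,
          PySem.Dict.getD, PySem.Dict.get?, List.find?, pvFirstMatch]
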